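-- pv_equiv track=rewrite | github.com/isaacholt100/code | cusps/reconstruct.py | esp_indices
-- ===== SOURCE A (Python) =====
-- def esp_indices(max: int, length: int) -> list[list[int]]:
--     assert length >= 1
--     assert max >= length
--     if length == 1:
--         return list([i] for i in range(max))
--     if max == length:
--         return [list(range(max))]
--     a = esp_indices(max - 1, length)
--     b = esp_indices(max - 1, length - 1)
--     for idx in b:
--         idx.append(max - 1)
--     return [*a, *b]
-- ===== SOURCE B (Python) =====
-- def esp_indices(max: int, length: int) -> list[list[int]]:
--     assert length >= 1
--     assert max >= length
--     # Bottom-up DP over subset size l: row holds the answers for sizes l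
--     # and all upper bounds m = l..max, so nothing is ever recomputed.
--     row = [[[i] for i in range(m)] for m in range(1, max + 1)]
--     for l in range(2, length + 1):
--         new = [[list(range(l))]]
--         for m in range(l + 1, max + 1):
--             new.append(new[-1] + [idx + [m - 1] for idx in row[m - l]])
--         row = new
--     return row[max - length]
-- ===== Notes on version B (the rewrite author's own statement) =====
-- stated objective: alternative
-- what changed: Replaces the naive binary recursion esp(max,length)=esp(max-1,length)+map(append)(esp(max-1,length-1)) by an explicit bottom-up dynamic-programming table filled level by level over the subset size, so each subproblem is computed exactly once.
import Mathlib
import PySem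

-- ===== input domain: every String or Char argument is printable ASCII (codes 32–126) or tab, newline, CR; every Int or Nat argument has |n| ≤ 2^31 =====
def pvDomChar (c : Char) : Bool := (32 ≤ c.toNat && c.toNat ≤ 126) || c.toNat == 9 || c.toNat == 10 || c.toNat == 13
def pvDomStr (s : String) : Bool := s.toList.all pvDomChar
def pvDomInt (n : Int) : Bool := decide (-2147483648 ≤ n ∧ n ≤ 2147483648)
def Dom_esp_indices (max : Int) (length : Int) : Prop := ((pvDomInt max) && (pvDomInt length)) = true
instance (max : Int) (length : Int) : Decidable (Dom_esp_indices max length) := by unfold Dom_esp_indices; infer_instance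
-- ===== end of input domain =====

-- B replaces A's naive binary recursion by a bottom-up DP table over the subset size
-- (objective: alternative structure; each subproblem computed once).

-- ===== PORT A =====
-- Literal port of A's recursion; the first guard is where Python's asserts raise
-- (those inputs are excluded by Pre_), it only makes the recursion total.
def esp_indices (max : Int) (length : Int) : List (List Int) :=
  if length < 1 ∨ max < length then []
  else if length = 1 then (PySem.List.pyRange 0 max 1).map (fun i => [i])
  else if max = length then [PySem.List.pyRange 0 max 1]
  else esp_indices (max - 1) length ++
       (esp_indices (max - 1) (length - 1)).map (fun idx => idx ++ [max - 1])
termination_by max.toNat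
decreasing_by all_goals omega

-- ===== PORT B =====
-- Literal port of Source B: level-1 row, then for l in range(2, length+1) build the new
-- row with an inner fold over m in range(l+1, max+1); new[-1] and row[m-l] are
-- in range whenever Pre_ holds, so the .getD [] defaults are never taken there.
def esp_indices_alt (max : Int) (length : Int) : List (List Int) :=
  if length < 1 ∨ max < length then []
  else
    let row0 : List (List (List Int)) :=
      (PySem.List.pyRange 1 (max + 1) 1).map
        (fun m => (PySem.List.pyRange 0 m 1).map (fun i => [i]))
    let row : List (List (List Int)) :=
      (PySem.List.pyRange 2 (length + 1) 1).foldl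
        (fun row l =>
          (PySem.List.pyRange (l + 1) (max + 1) 1).foldl
            (fun new m =>
              new ++ [((PySem.List.pyGet? new (-1)).getD []) ++
                      (((PySem.List.pyGet? row (m - l)).getD []).map
                        (fun idx => idx ++ [m - 1]))])
            [[PySem.List.pyRange 0 l 1]])
        row0
    (PySem.List.pyGet? row (max - length)).getD []

-- ===== PRECONDITION & SPEC =====
-- Pre_: exactly the inputs where A's asserts pass (length >= 1 and max >= length).
def Pre_esp_indices (max : Int) (length : Int) : Prop := 1 ≤ length ∧ length ≤ max
instance (max : Int) (length : Int) : Decidable (Pre_esp_indices max length) := by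
  unfold Pre_esp_indices; infer_instance
def pvWitness_esp_indices : Int × Int := (4, 2)

def Spec_esp_indices (max : Int) (length : Int) (out : List (List Int)) : Prop :=
  out = esp_indices_alt max length
instance (max : Int) (length : Int) (out : List (List Int)) : Decidable (Spec_esp_indices max length out) := by
  unfold Spec_esp_indices; infer_instance

-- ===== CLAIM (what is proved, stated in full; the proofs are below) =====
def Claim_equal_esp_indices : Prop := ∀ (max : Int) (length : Int), Dom_esp_indices max length → Pre_esp_indices max length → Spec_esp_indices max length (esp_indices max length)

-- ===== LEMMAS AND PROOFS =====

-- The row of answers of size l for all upper bounds m = l .. max.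
def pvRowOf (l max : Int) : List (List (List Int)) :=
  (PySem.List.pyRange l (max + 1) 1).map (fun m => esp_indices m l)

-- unfolding helpers for A's port
theorem esp_one (m : Int) (h : 1 ≤ m) :
    esp_indices m 1 = (PySem.List.pyRange 0 m 1).map (fun i => [i]) := by
  rw [esp_indices, if_neg (by omega : ¬((1:Int) < 1 ∨ m < 1)), if_pos rfl]

theorem esp_diag (l : Int) (h : 1 ≤ l) :
    esp_indices l l = [PySem.List.pyRange 0 l 1] := by
  rw [esp_indices, if_neg (by omega : ¬(l < 1 ∨ l < l))]
  by_cases hl1 : l = 1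
  · subst hl1; rw [if_pos rfl]; decide
  · rw [if_neg hl1, if_pos rfl]

theorem esp_step (m l : Int) (h1 : 2 ≤ l) (h2 : l < m) :
    esp_indices m l = esp_indices (m - 1) l ++
      (esp_indices (m - 1) (l - 1)).map (fun idx => idx ++ [m - 1]) := by
  rw [esp_indices, if_neg (by omega : ¬(l < 1 ∨ m < l)),
      if_neg (by omega : ¬(l = 1)), if_neg (by omega : ¬(m = l))]

-- base row is pvRowOf 1
theorem row0_eq (max : Int) :
    (PySem.List.pyRange 1 (max + 1) 1).map
      (fun m => (PySem.List.pyRange 0 m 1).map (fun i => [i])) = pvRowOf 1 max := by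
  unfold pvRowOf
  apply List.map_congr_left
  intro m hm
  rw [PySem.List.mem_pyRange_one] at hm
  rw [esp_one m hm.1]

-- last element of a built prefix
theorem last_of_row (l k : Int) (h : l < k) :
    PySem.List.pyGet?
      ((PySem.List.pyRange l k 1).map (fun m => esp_indices m l)) (-1)
      = some (esp_indices (k - 1) l) := by
  have hsplit := PySem.List.pyRange_one_succ_right (a := l) (b := k - 1) (by omega)
  rw [show k - 1 + 1 = k by ring] at hsplit
  rw [hsplit, List.map_append]
  exact PySem.List.pyGet?_neg_one_append_singleton _ _

-- indexing into pvRowOf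
theorem row_index (l max i : Int) (h0 : 0 ≤ i) (h1 : l + i ≤ max) :
    PySem.List.pyGet? (pvRowOf l max) i = some (esp_indices (l + i) l) := by
  unfold pvRowOf
  rw [PySem.List.pyRange_one_append l (l + i) (max + 1) (by omega) (by omega),
      PySem.List.pyRange_one_cons (by omega : l + i < max + 1),
      List.map_append, List.map_cons]
  have hlen : ((PySem.List.pyRange l (l + i) 1).map (fun m => esp_indices m l)).length
      = i.toNat := by
    simp [PySem.List.length_pyRange_one]
  have := PySem.List.pyGet?_append_length
    ((PySem.List.pyRange l (l + i) 1).map (fun m => esp_indices m l))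
    ((PySem.List.pyRange (l + i + 1) (max + 1) 1).map (fun m => esp_indices m l))
    (esp_indices (l + i) l)
  rw [hlen, show ((i.toNat : Nat) : Int) = i by omega] at this
  exact this

-- the inner fold builds the prefix of pvRowOf l up to k
theorem inner_fold (l max : Int) (hl : 2 ≤ l) (n : Nat) (k : Int)
    (hk : k = l + n) (hk2 : k ≤ max) :
    (PySem.List.pyRange (l + 1) (k + 1) 1).foldl
      (fun new m =>
        new ++ [((PySem.List.pyGet? new (-1)).getD []) ++
                (((PySem.List.pyGet? (pvRowOf (l - 1) max) (m - l)).getD []).map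
                  (fun idx => idx ++ [m - 1]))])
      [[PySem.List.pyRange 0 l 1]]
    = (PySem.List.pyRange l (k + 1) 1).map (fun m => esp_indices m l) := by
  induction n generalizing k with
  | zero =>
    have hkl : l = k := by omega
    subst hkl
    rw [PySem.List.pyRange_one_eq_nil (a := l + 1) (b := l + 1) le_rfl,
        PySem.List.pyRange_one_singleton]
    simp [esp_diag l (by omega)]
  | succ n ih =>
    have hsplit := PySem.List.pyRange_one_succ_right (a := l + 1) (b := k) (by omega)
    rw [hsplit, List.foldl_append]
    have hih := ih (k - 1) (by omega) (by omega)
    rw [show k - 1 + 1 = k by ring] at hih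
    rw [hih]
    simp only [List.foldl_cons, List.foldl_nil]
    rw [last_of_row l k (by omega)]
    have hrow := row_index (l - 1) max (k - l) (by omega) (by omega)
    rw [show l - 1 + (k - l) = k - 1 by ring] at hrow
    rw [hrow]
    simp only [Option.getD_some]
    rw [PySem.List.pyRange_one_succ_right (a := l) (b := k) (by omega), List.map_append]
    congr 1
    simp only [List.map_cons, List.map_nil]
    rw [esp_step k l hl (by omega)]

-- the outer fold builds pvRowOf L max for every 1 ≤ L ≤ max
theorem outer_fold (max : Int) (n : Nat) (L : Int) (hL : L = 1 + n) (h2 : L ≤ max) :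
    (PySem.List.pyRange 2 (L + 1) 1).foldl
      (fun row l =>
        (PySem.List.pyRange (l + 1) (max + 1) 1).foldl
          (fun new m =>
            new ++ [((PySem.List.pyGet? new (-1)).getD []) ++
                    (((PySem.List.pyGet? row (m - l)).getD []).map
                      (fun idx => idx ++ [m - 1]))])
          [[PySem.List.pyRange 0 l 1]])
      (pvRowOf 1 max)
    = pvRowOf L max := by
  induction n generalizing L with
  | zero =>
    have : L = 1 := by omega
    subst this
    rw [PySem.List.pyRange_one_eq_nil (a := 2) (b := 1 + 1) (by omega)]
    rfl
  | succ n ih =>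
    rw [PySem.List.pyRange_one_succ_right (a := 2) (b := L) (by omega), List.foldl_append]
    have hih := ih (L - 1) (by omega) (by omega)
    rw [show L - 1 + 1 = L by ring] at hih
    rw [hih]
    simp only [List.foldl_cons, List.foldl_nil]
    have := inner_fold L max (by omega) ((max - L).toNat) max (by omega) le_rfl
    rw [this]
    rfl

-- extract the answer from the final row
theorem row_get (l max : Int) (_h1 : 1 ≤ l) (h2 : l ≤ max) :
    (PySem.List.pyGet? (pvRowOf l max) (max - l)).getD [] = esp_indices max l := by
  have := row_index l max (max - l) (by omega) (by omega)
  rw [show l + (max - l) = max by ring] at this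
  rw [this]
  rfl

-- ===== VERDICT (by name: the statement is the Claim_ definition above) =====
theorem esp_indices_spec : Claim_equal_esp_indices := by
  intro max length _ hpre
  obtain ⟨h1, h2⟩ := hpre
  unfold Spec_esp_indices esp_indices_alt
  rw [if_neg (by omega)]
  simp only
  rw [row0_eq, outer_fold max ((length - 1).toNat) length (by omega) h2,
      row_get length max h1 h2]
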